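-- pv_equiv track=rewrite | github.com/leoztl/CS304_GroupProj6 | utils.py | uniform_seq
-- ===== SOURCE A (Python) =====
-- def uniform_seq(length, node_ls):
--     num = len(node_ls) - 2
--     tmp_seg_len = length // num
--     resil = length % num
--     idx = 0
--     segment = []
--     for i in range(num):
--         seg_len = tmp_seg_len
--         if resil > 0:
--             seg_len = tmp_seg_len + 1
--             resil -= 1
--         segment.append((idx, idx + seg_len))
--         idx += seg_len
--     seq = []
--     for i in range(num):
--         seq = seq + [node_ls[i + 1]] * (segment[i][1] - segment[i][0])
--     return segment, seq
-- ===== SOURCE B (Python) =====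
-- def _chunks(length, k):
--     # Divide and conquer: split the k segments into two halves; the left half's
--     # total is kl*(length//k) + min(kl, length % k), so both halves re-balance
--     # recursively to the same near-equal partition (larger chunks first).
--     if k <= 0:
--         return []
--     if k == 1:
--         return [length]
--     kl = k // 2
--     left = kl * (length // k) + min(kl, length % k)
--     return _chunks(left, kl) + _chunks(length - left, k - kl)
--
--
-- def uniform_seq(length, node_ls):
--     pos = 0
--     segment = []
--     seq = []
--     for i, sz in enumerate(_chunks(length, len(node_ls) - 2)):
--         segment.append((pos, pos + sz))
--         seq.extend([node_ls[i + 1]] * sz)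
--         pos += sz
--     return segment, seq
-- ===== Notes on version B (the rewrite author's own statement) =====
-- stated objective: faster
-- what changed: Segment sizes are computed by a recursive divide-and-conquer that splits the k segments into two halves and re-balances each half independently (replacing A's sequential loop with running idx/resil accumulators), and the sequence is assembled with extend instead of A's repeated quadratic list concatenation.
import Mathlib
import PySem

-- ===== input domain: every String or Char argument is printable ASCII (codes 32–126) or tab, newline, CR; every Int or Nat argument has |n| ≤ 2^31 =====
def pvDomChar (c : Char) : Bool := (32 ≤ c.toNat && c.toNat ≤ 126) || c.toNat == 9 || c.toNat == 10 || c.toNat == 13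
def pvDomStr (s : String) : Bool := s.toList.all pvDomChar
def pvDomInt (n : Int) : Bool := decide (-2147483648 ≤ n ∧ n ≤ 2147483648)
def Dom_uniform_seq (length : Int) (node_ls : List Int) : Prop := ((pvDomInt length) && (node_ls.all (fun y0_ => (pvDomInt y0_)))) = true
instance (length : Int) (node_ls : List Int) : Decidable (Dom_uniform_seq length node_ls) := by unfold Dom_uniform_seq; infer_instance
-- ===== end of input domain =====

-- B computes the segment sizes by a recursive divide-and-conquer (splitting the k
-- segments into two halves that re-balance independently) instead of A's sequential
-- accumulator loops; return value only, no mutation.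

-- ===== PORT A =====
-- literal port of A: first loop carries (resil, idx, segment); second loop rebuilds seq
-- from segment. List indexing node_ls[i+1] / segment[i] is always in range when the loops
-- run, so pyGetD with a dummy default is exact; [x] * k is List.replicate k.toNat x
-- (both give [] for k ≤ 0, exact).
def uniform_seq (length : Int) (node_ls : List Int) : (List (Int × Int)) × List Int :=
  let num : Int := (node_ls.length : Int) - 2
  let tmp_seg_len := PySem.Int.floordiv length num
  let st := (PySem.List.pyRange 0 num 1).foldl
    (fun (st : Int × Int × List (Int × Int)) _ =>
      let seg_len := if st.1 > 0 then tmp_seg_len + 1 else tmp_seg_len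
      let resil' := if st.1 > 0 then st.1 - 1 else st.1
      (resil', st.2.1 + seg_len, st.2.2 ++ [(st.2.1, st.2.1 + seg_len)]))
    (PySem.Int.mod length num, 0, [])
  let segment := st.2.2
  let seq := (PySem.List.pyRange 0 num 1).foldl
    (fun seq i =>
      let sg := PySem.List.pyGetD segment i (0, 0)
      seq ++ List.replicate (sg.2 - sg.1).toNat (PySem.List.pyGetD node_ls (i + 1) 0))
    []
  (segment, seq)

-- ===== PORT B =====
-- literal port of Source B's _chunks: divide-and-conquer segment sizes.
def pvChunks (L k : Int) : List Int :=
  if k ≤ 0 then []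
  else if k = 1 then [L]
  else
    pvChunks (PySem.Int.floordiv k 2 * PySem.Int.floordiv L k
                + min (PySem.Int.floordiv k 2) (PySem.Int.mod L k))
             (PySem.Int.floordiv k 2)
      ++ pvChunks (L - (PySem.Int.floordiv k 2 * PySem.Int.floordiv L k
                + min (PySem.Int.floordiv k 2) (PySem.Int.mod L k)))
             (k - PySem.Int.floordiv k 2)
termination_by k.toNat
decreasing_by
  all_goals
    rw [PySem.Int.floordiv_eq_ediv_of_pos (by omega : (0:Int) < 2)]
    omega

-- literal port of Source B's uniform_seq: one loop over enumerate(_chunks(...)) carrying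
-- (segment, seq, pos).
def uniform_seq_alt (length : Int) (node_ls : List Int) : (List (Int × Int)) × List Int :=
  let st := (PySem.List.enumerate (pvChunks length ((node_ls.length : Int) - 2)) 0).foldl
    (fun (st : List (Int × Int) × List Int × Int) p =>
      (st.1 ++ [(st.2.2, st.2.2 + p.2)],
       st.2.1 ++ List.replicate p.2.toNat (PySem.List.pyGetD node_ls (p.1 + 1) 0),
       st.2.2 + p.2))
    ([], [], 0)
  (st.1, st.2.1)

-- ===== PRECONDITION & SPEC =====
-- Pre_ excludes exactly node_ls of length 2, where A raises ZeroDivisionError (num = 0).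
def Pre_uniform_seq (length : Int) (node_ls : List Int) : Prop := node_ls.length ≠ 2
instance (length : Int) (node_ls : List Int) : Decidable (Pre_uniform_seq length node_ls) := by unfold Pre_uniform_seq; infer_instance
def pvWitness_uniform_seq : Int × List Int := (10, [0, 1, 2, 3, 4])

def Spec_uniform_seq (length : Int) (node_ls : List Int) (out : (List (Int × Int)) × List Int) : Prop := out = uniform_seq_alt length node_ls
instance (length : Int) (node_ls : List Int) (out : (List (Int × Int)) × List Int) : Decidable (Spec_uniform_seq length node_ls out) := by unfold Spec_uniform_seq; infer_instance

-- ===== CLAIM (what is proved, stated in full; the proofs are below) =====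
def Claim_equal_uniform_seq : Prop := ∀ (length : Int) (node_ls : List Int), Dom_uniform_seq length node_ls → Pre_uniform_seq length node_ls → Spec_uniform_seq length node_ls (uniform_seq length node_ls)

-- ===== LEMMAS AND PROOFS =====

-- closed-form segment i for quotient base and remainder r0
def pvSeg (base r0 i : Int) : Int × Int :=
  (i * base + min i r0, i * base + min i r0 + base + (if i < r0 then 1 else 0))

-- the repeated block contributed by segment i
def pvRep (base r0 : Int) (node_ls : List Int) (i : Int) : List Int :=
  List.replicate (base + (if i < r0 then 1 else 0)).toNat (PySem.List.pyGetD node_ls (i + 1) 0)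

-- floor division/modulus are determined by the decomposition a = b*q + s, 0 ≤ s < b
lemma pvFdm (a b q s : Int) (hb : 0 < b) (h : a = b * q + s) (h0 : 0 ≤ s) (h1 : s < b) :
    PySem.Int.floordiv a b = q ∧ PySem.Int.mod a b = s := by
  rw [PySem.Int.floordiv_eq_ediv_of_pos hb, PySem.Int.mod_eq_emod_of_pos hb]
  exact (Int.ediv_emod_unique hb).mpr ⟨by omega, h0, h1⟩

-- divide-and-conquer sizes = the closed-form balanced partition
lemma pvChunks_eq (n : Nat) : ∀ L : Int, 0 < n →
    pvChunks L (n : Int)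
      = (PySem.List.pyRange 0 (n : Int) 1).map
          (fun i => PySem.Int.floordiv L (n : Int) +
                    if i < PySem.Int.mod L (n : Int) then 1 else 0) := by
  induction n using Nat.strong_induction_on with
  | _ n ih =>
    intro L hn
    rw [pvChunks]
    by_cases h1 : n = 1
    · subst h1
      have hd : PySem.Int.floordiv L 1 = L ∧ PySem.Int.mod L 1 = 0 :=
        pvFdm L 1 L 0 (by omega) (by ring) le_rfl (by omega)
      have h01 : PySem.List.pyRange 0 1 1 = [0] := by
        have := PySem.List.pyRange_one_singleton (0 : Int)
        simpa using this
      simp [h01]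
    · have hn2 : 2 ≤ n := by omega
      have hk0 : ¬ ((n : Int) ≤ 0) := by omega
      have hk1 : ¬ ((n : Int) = 1) := by omega
      simp only [hk0, hk1, if_false]
      have hkl : PySem.Int.floordiv (n : Int) 2 = ((n / 2 : Nat) : Int) := by
        rw [PySem.Int.floordiv_eq_ediv_of_pos (by omega : (0:Int) < 2)]
        omega
      set m : Nat := n / 2 with hm
      have hm1 : 1 ≤ m := by omega
      have hmn : m < n := by omega
      have hmr : 1 ≤ n - m := by omega
      set base := PySem.Int.floordiv L (n : Int) with hbase
      set r := PySem.Int.mod L (n : Int) with hr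
      have hr0 : 0 ≤ r := PySem.Int.mod_nonneg L (by omega)
      have hrn : r < (n : Int) := PySem.Int.mod_lt L (by omega)
      have hLrec : L = (n : Int) * base + r := by
        have := PySem.Int.floordiv_mul_add_mod L (n : Int)
        rw [← hbase, ← hr] at this; linarith
      rw [hkl]
      set left := ((m : Nat) : Int) * base + min ((m : Nat) : Int) r with hleft
      -- left half
      have hL : PySem.Int.floordiv left (m : Int) = base + (if (m : Int) ≤ r then 1 else 0)
              ∧ PySem.Int.mod left (m : Int) = (if (m : Int) ≤ r then 0 else r) := by
        by_cases hc : (m : Int) ≤ r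
        · have : left = (m : Int) * (base + 1) + 0 := by
            rw [hleft, min_eq_left hc]; ring
          simpa [hc] using pvFdm left (m : Int) (base + 1) 0 (by omega) this le_rfl (by omega)
        · have : left = (m : Int) * base + r := by
            rw [hleft, min_eq_right (by omega)]
          simpa [hc] using pvFdm left (m : Int) base r (by omega) this hr0 (by omega)
      -- right half
      have hR : PySem.Int.floordiv (L - left) ((n : Int) - (m : Int)) = base
              ∧ PySem.Int.mod (L - left) ((n : Int) - (m : Int)) = r - min ((m : Int)) r := by
        have hdec : L - left = ((n : Int) - (m : Int)) * base + (r - min ((m : Int)) r) := by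
          rw [hleft, hLrec]; ring
        exact pvFdm _ _ _ _ (by omega) hdec (by omega) (by omega)
      have hcast : (n : Int) - (m : Int) = ((n - m : Nat) : Int) := by push_cast; omega
      rw [ih m hmn left hm1]
      rw [hcast] at hR ⊢
      rw [ih (n - m) (by omega) (L - left) hmr]
      rw [hL.1, hL.2, hR.1, hR.2]
      rw [PySem.List.pyRange_one_append 0 (m : Int) (n : Int) (by omega) (by omega),
          List.map_append]
      congr 1
      · apply List.map_congr_left
        intro i hi
        rw [PySem.List.mem_pyRange_one] at hi
        by_cases hc : (m : Int) ≤ r <;> simp only [hc, if_true, if_false]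
        · have h1 : i < r := by omega
          have h2 : ¬ (i < 0) := by omega
          simp [h1, h2]
        · simp
      · rw [PySem.List.pyRange_one, PySem.List.pyRange_one, List.map_map, List.map_map]
        simp only [sub_zero, hcast]
        apply List.map_congr_left
        intro k hk
        rw [List.mem_range] at hk
        have hk' : (k : Int) < ((n - m : Nat) : Int) - 0 := by
          have : k < (n - m) := by
            have : (((n - m : Nat) : Int) - 0).toNat = n - m := by omega
            omega
          omega
        simp only [Function.comp, zero_add]
        by_cases hc : (m : Int) ≤ r
        · rw [min_eq_left hc]
          by_cases h : (m : Int) + (k : Int) < r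
          · have h' : (k : Int) < r - m := by omega
            simp [h, h']
          · have h' : ¬ ((k : Int) < r - m) := by omega
            simp [h, h']
        · rw [min_eq_right (by omega)]
          have h3 : ¬ ((m : Int) + k < r) := by omega
          simp [h3]

-- enumerate of a map over range(0, n) is the range paired with the mapped values
lemma pvEnumMap {α : Type} (g : Int → α) (n : Nat) :
    PySem.List.enumerate ((PySem.List.pyRange 0 (n : Int) 1).map g) 0
      = (PySem.List.pyRange 0 (n : Int) 1).map (fun i => (i, g i)) := by
  induction n with
  | zero => simp [PySem.List.enumerate_nil]
  | succ n ih =>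
    have hsplit : PySem.List.pyRange 0 ((n + 1 : Nat) : Int) 1
        = PySem.List.pyRange 0 (n : Int) 1 ++ [(n : Int)] := by
      push_cast
      exact PySem.List.pyRange_one_succ_right (by positivity)
    rw [hsplit, List.map_append, List.map_append, PySem.List.enumerate_append, ih]
    congr 1
    simp [PySem.List.enumerate_cons, PySem.List.enumerate_nil, PySem.List.length_pyRange_one]

-- B's loop over the enumerated closed-form sizes builds the same segments and sequence
lemma pvLoopB (base r0 : Int) (node_ls : List Int) (hr0 : 0 ≤ r0) (k : Nat) :
    ((PySem.List.pyRange 0 (k : Int) 1).map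
        (fun i => (i, base + if i < r0 then 1 else 0))).foldl
      (fun (st : List (Int × Int) × List Int × Int) p =>
        (st.1 ++ [(st.2.2, st.2.2 + p.2)],
         st.2.1 ++ List.replicate p.2.toNat (PySem.List.pyGetD node_ls (p.1 + 1) 0),
         st.2.2 + p.2))
      ([], [], 0)
    = ((PySem.List.pyRange 0 (k : Int) 1).map (pvSeg base r0),
       (PySem.List.pyRange 0 (k : Int) 1).flatMap (pvRep base r0 node_ls),
       (k : Int) * base + min (k : Int) r0) := by
  induction k with
  | zero => simp; omega
  | succ k ih =>
    have hsplit : PySem.List.pyRange 0 ((k + 1 : Nat) : Int) 1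
        = PySem.List.pyRange 0 (k : Int) 1 ++ [(k : Int)] := by
      push_cast
      exact PySem.List.pyRange_one_succ_right (by positivity)
    rw [hsplit, List.map_append, List.map_append, List.flatMap_append, List.foldl_append, ih]
    simp only [List.map_cons, List.map_nil, List.foldl_cons, List.foldl_nil,
      List.flatMap_cons, List.flatMap_nil, Prod.mk.injEq]
    refine ⟨?_, ?_, ?_⟩
    · simp [pvSeg, add_assoc]
    · simp [pvRep]
    · push_cast
      rw [show ((k : Int) + 1) * base = (k : Int) * base + base from by ring]
      split_ifs with h <;> generalize (k : Int) * base = t <;> omega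

-- invariant of A's first loop after k iterations
lemma pvLoopA1 (base r0 : Int) (h0 : 0 ≤ r0) (k : Nat) :
    (PySem.List.pyRange 0 (k : Int) 1).foldl
      (fun (st : Int × Int × List (Int × Int)) _ =>
        let seg_len := if st.1 > 0 then base + 1 else base
        let resil' := if st.1 > 0 then st.1 - 1 else st.1
        (resil', st.2.1 + seg_len, st.2.2 ++ [(st.2.1, st.2.1 + seg_len)]))
      (r0, 0, [])
    = (max (r0 - k) 0, (k : Int) * base + min (k : Int) r0,
       (PySem.List.pyRange 0 (k : Int) 1).map (pvSeg base r0)) := by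
  induction k with
  | zero => simp; omega
  | succ k ih =>
    have hsplit : PySem.List.pyRange 0 ((k + 1 : Nat) : Int) 1
        = PySem.List.pyRange 0 (k : Int) 1 ++ [(k : Int)] := by
      push_cast
      exact PySem.List.pyRange_one_succ_right (by positivity)
    rw [hsplit, List.foldl_append, ih, List.map_append]
    simp only [List.foldl_cons, List.foldl_nil, List.map_cons, List.map_nil, Prod.mk.injEq]
    have hcase : (max (r0 - (k : Int)) 0 > 0) = ((k : Int) < r0) := by
      by_cases h : (k : Int) < r0 <;> simp [h]
    refine ⟨?_, ?_, ?_⟩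
    · simp only [hcase]; by_cases h : (k : Int) < r0 <;> simp [h] <;> omega
    · simp only [hcase]
      push_cast
      rw [show ((k : Int) + 1) * base = (k : Int) * base + base from by ring]
      split_ifs with h <;> generalize (k : Int) * base = t <;> omega
    · simp only [hcase]
      simp only [pvSeg]
      by_cases h : (k : Int) < r0 <;> simp [h] ; ring_nf

-- A's second loop, reading from the full closed-form segment list
lemma pvLoopA2 (base r0 : Int) (node_ls : List Int) (n k : Nat) (hk : k ≤ n) :
    (PySem.List.pyRange 0 (k : Int) 1).foldl
      (fun seq i =>
        let sg := PySem.List.pyGetD ((PySem.List.pyRange 0 (n : Int) 1).map (pvSeg base r0)) i (0, 0)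
        seq ++ List.replicate (sg.2 - sg.1).toNat (PySem.List.pyGetD node_ls (i + 1) 0))
      []
    = (PySem.List.pyRange 0 (k : Int) 1).flatMap (pvRep base r0 node_ls) := by
  induction k with
  | zero => simp
  | succ k ih =>
    have hsplit : PySem.List.pyRange 0 ((k + 1 : Nat) : Int) 1
        = PySem.List.pyRange 0 (k : Int) 1 ++ [(k : Int)] := by
      push_cast
      exact PySem.List.pyRange_one_succ_right (by positivity)
    rw [hsplit, List.foldl_append, ih (by omega), List.flatMap_append]
    simp only [List.foldl_cons, List.foldl_nil, List.flatMap_cons, List.flatMap_nil]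
    congr 1
    have hget : PySem.List.pyGetD ((PySem.List.pyRange 0 (n : Int) 1).map (pvSeg base r0)) (k : Int) (0, 0)
        = pvSeg base r0 k := by
      rw [PySem.List.pyRange_zero_natCast, List.map_map, PySem.List.pyGetD_natCast,
          PySem.List.getD_map_range _ _ _ _ (by omega)]
      rfl
    rw [hget]
    simp [pvSeg, pvRep]
    ring_nf

-- ===== VERDICT (by name: the statements are the Claim_ definitions above) =====
theorem uniform_seq_spec : Claim_equal_uniform_seq := by
  intro length node_ls _ hpre
  unfold Spec_uniform_seq
  simp only [uniform_seq, uniform_seq_alt]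
  by_cases hpos : 0 < (node_ls.length : Int) - 2
  · obtain ⟨n, hn⟩ : ∃ n : Nat, (node_ls.length : Int) - 2 = (n : Int) :=
      ⟨((node_ls.length : Int) - 2).toNat, by omega⟩
    have hn0 : 0 < n := by omega
    rw [hn]
    have hr0 : 0 ≤ PySem.Int.mod length (n : Int) :=
      PySem.Int.mod_nonneg length (by omega)
    rw [pvLoopA1 (PySem.Int.floordiv length (n : Int)) (PySem.Int.mod length (n : Int)) hr0,
        pvLoopA2 _ _ _ n n (le_refl n),
        pvChunks_eq n length hn0, pvEnumMap, pvLoopB _ _ _ hr0]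
  · have hneg : (node_ls.length : Int) - 2 < 0 := by
      have : node_ls.length ≠ 2 := hpre
      omega
    have hemp : PySem.List.pyRange 0 ((node_ls.length : Int) - 2) 1 = [] := by
      simp [PySem.List.pyRange]
      omega
    have hch : pvChunks length ((node_ls.length : Int) - 2) = [] := by
      rw [pvChunks]; simp [show (node_ls.length : Int) - 2 ≤ 0 from by omega]
    rw [hemp, hch]
    simp [PySem.List.enumerate_nil]
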